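-- pv_equiv track=rewrite | github.com/Scienthusiast/answer_validation | python/is_valid_answer.py | get_should_inverse
-- ===== SOURCE A (Python) =====
-- def get_should_inverse(sequence):
-- 	current_operator = '+'
-- 	for term in sequence:
-- 		if term in ['+', '-', '/', '*']:
-- 			current_operator = term
-- 		elif term == '=':
-- 			current_operator = '+'
-- 		elif term == '?':
-- 			return current_operator == '/'
-- 	return False
-- ===== SOURCE B (Python) =====
-- def get_should_inverse(sequence):
--     seq = list(sequence)
--     if '?' not in seq:
--         return False
--     ops = [t for t in seq[:seq.index('?')] if t in ('+', '-', '/', '*', '=')]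
--     return bool(ops) and ops[-1] == '/'
-- ===== Notes on version B (the rewrite author's own statement) =====
-- stated objective: alternative
-- what changed: Replaces A's one-pass operator state machine by find-first-'?', slice the prefix, filter the operator/'=' tokens with a comprehension and test whether the last is '/'.
import Mathlib
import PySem

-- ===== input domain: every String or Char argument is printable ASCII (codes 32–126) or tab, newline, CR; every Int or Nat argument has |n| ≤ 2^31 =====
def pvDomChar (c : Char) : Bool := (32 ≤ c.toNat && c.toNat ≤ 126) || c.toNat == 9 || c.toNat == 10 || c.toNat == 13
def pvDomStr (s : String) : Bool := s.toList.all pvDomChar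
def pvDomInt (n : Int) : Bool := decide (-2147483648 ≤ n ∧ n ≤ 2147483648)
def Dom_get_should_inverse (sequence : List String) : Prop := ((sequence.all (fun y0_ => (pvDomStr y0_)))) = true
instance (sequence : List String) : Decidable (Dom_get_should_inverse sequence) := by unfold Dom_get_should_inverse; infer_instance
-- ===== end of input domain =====

-- B replaces A's one-pass operator state machine by: find the first '?', filter the
-- operator/'=' tokens of the prefix before it, and test whether the last one is '/'
-- (alternative decomposition, same O(n) cost).

-- ===== PORT A =====
-- A's for-loop carrying current_operator, returning at the first '?'.
def gsiLoop (cur : String) : List String → Bool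
  | [] => false
  | term :: rest =>
    if term = "+" ∨ term = "-" ∨ term = "/" ∨ term = "*" then gsiLoop term rest
    else if term = "=" then gsiLoop "+" rest
    else if term = "?" then cur == "/"
    else gsiLoop cur rest

def get_should_inverse (sequence : List String) : Bool := gsiLoop "+" sequence

-- ===== PORT B =====
-- Source B's membership test for the list comprehension
def gsiIsOp (t : String) : Bool := t == "+" || t == "-" || t == "/" || t == "*" || t == "="

def get_should_inverse_alt (sequence : List String) : Bool :=
  if sequence.contains "?" then
    match PySem.List.index? sequence "?" with
    | some i =>
        let ops := (PySem.List.slice sequence none (some (i : Int))).filter gsiIsOp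
        !ops.isEmpty && (ops.getLast?.getD "" == "/")
    | none => false
  else false

-- ===== PRECONDITION & SPEC =====
def Spec_get_should_inverse (sequence : List String) (out : Bool) : Prop := out = get_should_inverse_alt sequence
instance (sequence : List String) (out : Bool) : Decidable (Spec_get_should_inverse sequence out) := by unfold Spec_get_should_inverse; infer_instance

-- ===== CLAIM (what is proved, stated in full; the proofs are below) =====
def Claim_equal_get_should_inverse : Prop := ∀ (sequence : List String), Dom_get_should_inverse sequence → Spec_get_should_inverse sequence (get_should_inverse sequence)

-- ===== LEMMAS AND PROOFS =====

-- A returns False when no '?' occurs.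
theorem gsiLoop_no_q (cur : String) (l : List String) (h : "?" ∉ l) : gsiLoop cur l = false := by
  induction l generalizing cur with
  | nil => rfl
  | cons t rest ih =>
    simp only [List.mem_cons, not_or] at h
    unfold gsiLoop
    split_ifs with h1 h2 h3
    · exact ih t h.2
    · exact ih "+" h.2
    · exact absurd h3.symm h.1
    · exact ih cur h.2

-- A's value at the first '?' is determined by the last operator/'=' token of the prefix.
theorem gsiLoop_q (cur : String) (pre suf : List String) (h : "?" ∉ pre) :
    gsiLoop cur (pre ++ "?" :: suf) =
      (match (pre.filter gsiIsOp).getLast? with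
       | some t => t == "/"
       | none => cur == "/") := by
  induction pre generalizing cur with
  | nil => simp [gsiLoop]
  | cons t rest ih =>
    simp only [List.mem_cons, not_or] at h
    by_cases h1 : t = "+" ∨ t = "-" ∨ t = "/" ∨ t = "*"
    · have hop : gsiIsOp t = true := by
        rcases h1 with h1 | h1 | h1 | h1 <;> simp [gsiIsOp, h1]
      rw [List.cons_append]
      unfold gsiLoop
      rw [if_pos h1, ih t h.2]
      rw [List.filter_cons_of_pos hop]
      cases hl : (rest.filter gsiIsOp).getLast? with
      | none =>
        simp [List.getLast?_eq_none_iff.mp hl]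
      | some u =>
        rcases List.getLast?_eq_some_iff.mp hl with ⟨l', hl'⟩
        rw [hl', show t :: (l' ++ [u]) = (t :: l') ++ [u] from rfl, List.getLast?_concat]
    · by_cases h2 : t = "="
      · subst h2
        rw [List.cons_append]
        unfold gsiLoop
        rw [if_neg h1, if_pos rfl, ih "+" h.2]
        rw [List.filter_cons_of_pos (by simp [gsiIsOp])]
        cases hl : (rest.filter gsiIsOp).getLast? with
        | none =>
          simp [List.getLast?_eq_none_iff.mp hl]
        | some u =>
          rcases List.getLast?_eq_some_iff.mp hl with ⟨l', hl'⟩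
          rw [hl', show "=" :: (l' ++ [u]) = ("=" :: l') ++ [u] from rfl, List.getLast?_concat]
      · have hop : gsiIsOp t = false := by
          simp only [not_or] at h1
          simp [gsiIsOp, h1.1, h1.2.1, h1.2.2.1, h1.2.2.2, h2]
        rw [List.cons_append]
        unfold gsiLoop
        rw [if_neg h1, if_neg h2, if_neg (fun hh => h.1 hh.symm), ih cur h.2,
            List.filter_cons_of_neg (by simp [hop])]

-- ===== VERDICT (by name: the statement is the Claim_ definition above) =====
theorem get_should_inverse_spec : Claim_equal_get_should_inverse := by
  intro sequence _
  unfold Spec_get_should_inverse get_should_inverse get_should_inverse_alt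
  by_cases hq : "?" ∈ sequence
  · rw [if_pos (by simpa using hq)]
    have hs : (PySem.List.index? sequence "?").isSome := (PySem.List.index?_isSome_iff _ _).mpr hq
    cases hidx : PySem.List.index? sequence "?" with
    | none => rw [hidx] at hs; simp at hs
    | some i =>
      rcases (PySem.List.index?_eq_some_iff _ _ _).mp hidx with ⟨pre, suf, hseq, hlen, hnot⟩
      subst hseq
      have hslice : PySem.List.slice (pre ++ "?" :: suf) none (some (i : Int)) = pre := by
        rw [PySem.List.slice_to_natCast]
        subst hlen
        simp
      rw [gsiLoop_q "+" pre suf hnot]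
      simp only [hslice]
      cases hl : (pre.filter gsiIsOp).getLast? with
      | none =>
        simp [List.getLast?_eq_none_iff.mp hl]
      | some u =>
        rcases List.getLast?_eq_some_iff.mp hl with ⟨l', hl'⟩
        simp [hl']
  · rw [if_neg (by simpa using hq), gsiLoop_no_q "+" sequence hq]
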